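-- pv_equiv track=rewrite | github.com/Jaeyeop-Jung/CodingTest | 프로그래머스/Lv3/1회차/Lv3. N으로 표현.py | solution
-- ===== SOURCE A (Python) =====
-- def solution(N, number):
--     if number == 1:
--         return 1
--
--     dp = []
--     for n in range(1, 9):
--         temp = set()
--         temp.add(int(str(N) * n))
--         for i in range(n - 1):
--             for op1 in dp[i]:
--                 for op2 in dp[-i - 1]:
--                     temp.add(op1 + op2)
--                     temp.add(op1 - op2)
--                     temp.add(op1 * op2)
--                     if op2 != 0:
--                         temp.add(op1 // op2)
--         if number in temp:
--             return n
--         dp.append(temp)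
--     return -1
-- ===== SOURCE B (Python) =====
-- def solution(N, number):
--     if number == 1:
--         return 1
--     cache = {}
--     def reach(n):
--         if n in cache:
--             return cache[n]
--         vals = {int(str(N) * n)}
--         for i in range(1, n):
--             for a in reach(i):
--                 for b in reach(n - i):
--                     vals.add(a + b)
--                     vals.add(a - b)
--                     vals.add(a * b)
--                     if b != 0:
--                         vals.add(a // b)
--         cache[n] = vals
--         return vals
--     for n in range(1, 9):
--         if number in reach(n):
--             return n
--     return -1
-- ===== Notes on version B (the rewrite author's own statement) =====
-- stated objective: alternative
-- what changed: Replaces the bottom-up dp-list-of-sets loop with a memoized top-down recursion reach(n) over splits i + (n-i), checked level by level.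
-- outside the precondition, e.g. on solution(-3, 5): A raises ValueError, B raises ValueError
import Mathlib
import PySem

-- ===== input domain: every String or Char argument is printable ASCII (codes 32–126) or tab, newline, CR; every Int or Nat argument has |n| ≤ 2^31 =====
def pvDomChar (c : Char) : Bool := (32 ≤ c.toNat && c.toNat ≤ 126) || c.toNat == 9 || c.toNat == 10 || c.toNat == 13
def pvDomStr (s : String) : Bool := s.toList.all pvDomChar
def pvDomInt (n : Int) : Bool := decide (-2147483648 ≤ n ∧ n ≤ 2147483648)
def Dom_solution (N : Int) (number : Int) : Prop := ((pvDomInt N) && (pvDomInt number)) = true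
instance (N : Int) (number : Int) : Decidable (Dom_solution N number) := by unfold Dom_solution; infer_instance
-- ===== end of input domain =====

-- B replaces the bottom-up dp-list DP with a memoized top-down recursion reach(n); objective: alternative decomposition, same results.
-- Python's hash sets are ported (in BOTH ports) as Std.TreeSet Int: only membership and set-building consume them,
-- so the returned value is independent of the set's iteration order; B's memo cache is a Python speed device, its
-- Lean port is the recursion itself.

-- ===== PORT A =====
-- int(str(N) * n); getD 0 is a totalising guard: under Pre_solution the parse never fails before a return
def pvConcatA (N : Int) (n : Int) : Int :=
  (PySem.Int.ofChars? (PySem.List.pyRepeat (PySem.Int.toChars N) n)).getD 0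

-- the two inner loops 'for op1 in s: for op2 in t: …' of A
def pvInnerA (temp : Std.TreeSet Int) (s t : Std.TreeSet Int) : Std.TreeSet Int :=
  s.foldl (fun temp op1 =>
    t.foldl (fun temp op2 =>
      let temp := temp.insert (op1 + op2)
      let temp := temp.insert (op1 - op2)
      let temp := temp.insert (op1 * op2)
      if op2 != 0 then temp.insert (PySem.Int.floordiv op1 op2) else temp) temp) temp

-- the body building temp for one n; dp indexing via pyGet? (getD ∅ is a totalising guard: indices are in range)
def pvTempA (N : Int) (dp : List (Std.TreeSet Int)) (n : Int) : Std.TreeSet Int :=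
  let temp : Std.TreeSet Int := Std.TreeSet.empty.insert (pvConcatA N n)
  (PySem.List.pyRange 0 (n - 1) 1).foldl (fun temp i =>
    pvInnerA temp ((PySem.List.pyGet? dp i).getD Std.TreeSet.empty)
                  ((PySem.List.pyGet? dp (-i - 1)).getD Std.TreeSet.empty)) temp

-- 'for n in range(1, 9): … if number in temp: return n; dp.append(temp)'
def pvLoopA (N : Int) (number : Int) (dp : List (Std.TreeSet Int)) : List Int → Int
  | [] => -1
  | n :: rest =>
      let temp := pvTempA N dp n
      if temp.contains number then n else pvLoopA N number (dp ++ [temp]) rest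

def solution (N : Int) (number : Int) : Int :=
  if number == 1 then 1 else pvLoopA N number [] (PySem.List.pyRange 1 9 1)

-- ===== PORT B =====
def pvConcatB (N : Int) (n : Int) : Int :=
  (PySem.Int.ofChars? (PySem.List.pyRepeat (PySem.Int.toChars N) n)).getD 0

-- the two inner loops 'for a in reach(i): for b in reach(n-i): …' of B
def pvOpsB (vals : Std.TreeSet Int) (s t : Std.TreeSet Int) : Std.TreeSet Int :=
  s.foldl (fun vals a =>
    t.foldl (fun vals b =>
      let vals := vals.insert (a + b)
      let vals := vals.insert (a - b)
      let vals := vals.insert (a * b)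
      if b != 0 then vals.insert (PySem.Int.floordiv a b) else vals) vals) vals

-- reach(n): values expressible with n copies of N (memo cache is a Python speed device; the recursion is the algorithm)
def pvReach (N : Int) (n : Nat) : Std.TreeSet Int :=
  let vals : Std.TreeSet Int := Std.TreeSet.empty.insert (pvConcatB N (n : Int))
  (List.range' 1 (n - 1)).foldl (fun vals i =>
    if _h : 1 ≤ i ∧ i < n then pvOpsB vals (pvReach N i) (pvReach N (n - i)) else vals) vals
termination_by n
decreasing_by
  · exact _h.2
  · omega

def pvLoopB (N : Int) (number : Int) : List Nat → Int
  | [] => -1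
  | n :: rest => if (pvReach N n).contains number then (n : Int) else pvLoopB N number rest

def solution_alt (N : Int) (number : Int) : Int :=
  if number == 1 then 1 else pvLoopB N number (List.range' 1 8)

-- ===== PRECONDITION & SPEC =====
-- Pre_ excludes only inputs where A raises ValueError: for N < 0, str(N)*n is no int literal once n ≥ 2,
-- so A returns only when it answers at n = 1 first (number == 1 or number == N).
def Pre_solution (N : Int) (number : Int) : Prop := 0 ≤ N ∨ number = 1 ∨ number = N
instance (N : Int) (number : Int) : Decidable (Pre_solution N number) := by unfold Pre_solution; infer_instance
def pvWitness_solution : Int × Int := (5, 12)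

def Spec_solution (N : Int) (number : Int) (out : Int) : Prop := out = solution_alt N number
instance (N : Int) (number : Int) (out : Int) : Decidable (Spec_solution N number out) := by unfold Spec_solution; infer_instance

-- ===== CLAIM (what is proved, stated in full; the proofs are below) =====
def Claim_equal_solution : Prop := ∀ (N : Int) (number : Int), Dom_solution N number → Pre_solution N number → Spec_solution N number (solution N number)

-- ===== LEMMAS AND PROOFS =====

theorem temp_eq_reach (N : Int) (n : Nat) (hn : 1 ≤ n) :
    pvTempA N ((List.range' 1 (n - 1)).map (pvReach N)) (n : Int) = pvReach N n := by
  conv_rhs => rw [pvReach]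
  unfold pvTempA
  have h1 : ((n : Int) - 1) = ((n - 1 : Nat) : Int) := by omega
  rw [h1, PySem.List.pyRange_one]
  simp only [sub_zero, Int.toNat_natCast, zero_add, List.foldl_map]
  conv_rhs => rw [List.range'_eq_map_range, List.foldl_map]
  simp only [pvConcatA, pvConcatB]
  apply PySem.List.foldl_congr_mem
  intro acc k hk
  have hk' : k < n - 1 := List.mem_range.mp hk
  have hd : (1:Nat) ≤ 1 + k ∧ 1 + k < n := ⟨by omega, by omega⟩
  rw [dif_pos hd]
  have hlen : ((List.range' 1 (n-1)).map (pvReach N)).length = n - 1 := by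
    simp
  have e1 : (PySem.List.pyGet? ((List.range' 1 (n-1)).map (pvReach N)) (k:Int)).getD Std.TreeSet.empty
      = pvReach N (1 + k) := by
    rw [PySem.List.pyGet?_natCast]
    rw [List.getElem?_map, List.getElem?_range' hk']
    simp
  have e2 : (PySem.List.pyGet? ((List.range' 1 (n-1)).map (pvReach N)) (-(k:Int) - 1)).getD Std.TreeSet.empty
      = pvReach N (n - (1 + k)) := by
    have hneg : (-(k:Int) - 1) = -((k + 1 : Nat) : Int) := by push_cast; ring
    rw [hneg, PySem.List.pyGet?_neg_natCast _ (k+1) (by omega) (by rw [hlen]; omega)]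
    rw [hlen]
    rw [List.getElem?_map, List.getElem?_range' (by omega)]
    simp only [Option.map_some, Option.getD_some]
    congr 1
    omega
  rw [e1, e2]
  rfl

theorem loop_eq (N number : Int) : ∀ (m k : Nat), m + k = 9 → 1 ≤ k →
    pvLoopA N number ((List.range' 1 (k - 1)).map (pvReach N)) (PySem.List.pyRange (k:Int) 9)
      = pvLoopB N number (List.range' k m) := by
  intro m
  induction m with
  | zero =>
      intro k hk _
      rw [PySem.List.pyRange_one_eq_nil (by omega)]
      rfl
  | succ m ih =>
      intro k hk hk1
      rw [PySem.List.pyRange_one_cons (by omega), List.range'_succ]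
      simp only [pvLoopA, pvLoopB]
      rw [temp_eq_reach N k hk1]
      by_cases hmem : (pvReach N k).contains number
      · simp [hmem]
      · simp only [hmem]
        have hdp : (List.range' 1 (k - 1)).map (pvReach N) ++ [pvReach N k]
            = (List.range' 1 ((k + 1) - 1)).map (pvReach N) := by
          have hk' : (k + 1) - 1 = (k - 1) + 1 := by omega
          rw [hk', List.range'_concat, List.map_append, List.map_singleton]
          have hone : 1 + 1 * (k - 1) = k := by omega
          rw [hone]
        rw [hdp]
        have hcast : ((k:Int) + 1) = (((k + 1 : Nat)) : Int) := by push_cast; ring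
        rw [hcast]
        exact ih (k + 1) (by omega) (by omega)

-- ===== VERDICT (by name: the statement is the Claim_ definition above) =====
theorem solution_spec : Claim_equal_solution := by
  intro N number _ _
  unfold Spec_solution solution solution_alt
  by_cases h : number = 1
  · simp [h]
  · simp only [beq_iff_eq, h, if_false]
    have := loop_eq N number 8 1 (by omega) (by omega)
    simpa using this
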